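-- pv_equiv track=rewrite | github.com/awaisnazir08/Problems-LeetCode | 864-image-overlap/image-overlap.py | largestOverlap
-- ===== SOURCE A (Python) =====
-- def largestOverlap(img1, img2):
--     """
--     :type img1: List[List[int]]
--     :type img2: List[List[int]]
--     :rtype: int
--     """
--
--     N = len(img1)
--     best = 0
--     for dx in range(-N+1, N):
--         for dy in range(-N+1, N):
--             current_overlap = 0
--             for x in range(N):
--                 if 0 <= dx + x < N:
--                     for y in range(N):
--                         if 0 <= (dy + y) < N:
--                             current_overlap += int(img1[x + dx][y + dy] == img2[x][y] == 1)
--             best = max(best, current_overlap)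
--
--     return best
-- ===== SOURCE B (Python) =====
-- def largestOverlap(img1, img2):
--     N = len(img1)
--     ones1 = [(x, y) for x in range(N) for y in range(N) if img1[x][y] == 1]
--     ones2 = [(x, y) for x in range(N) for y in range(N) if img2[x][y] == 1]
--     counts = {}
--     best = 0
--     for x1, y1 in ones1:
--         for x2, y2 in ones2:
--             d = (x1 - x2, y1 - y2)
--             c = counts.get(d, 0) + 1
--             counts[d] = c
--             if c > best:
--                 best = c
--     return best
-- ===== Notes on version B (the rewrite author's own statement) =====
-- stated objective: faster
-- what changed: Instead of scanning the whole N x N grid for each of the (2N-1)^2 shifts, B collects the coordinates of the 1-cells of both images once and counts, in a dictionary, how many pairs of 1-cells realise each displacement vector; the answer is the largest such count.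
import Mathlib
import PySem

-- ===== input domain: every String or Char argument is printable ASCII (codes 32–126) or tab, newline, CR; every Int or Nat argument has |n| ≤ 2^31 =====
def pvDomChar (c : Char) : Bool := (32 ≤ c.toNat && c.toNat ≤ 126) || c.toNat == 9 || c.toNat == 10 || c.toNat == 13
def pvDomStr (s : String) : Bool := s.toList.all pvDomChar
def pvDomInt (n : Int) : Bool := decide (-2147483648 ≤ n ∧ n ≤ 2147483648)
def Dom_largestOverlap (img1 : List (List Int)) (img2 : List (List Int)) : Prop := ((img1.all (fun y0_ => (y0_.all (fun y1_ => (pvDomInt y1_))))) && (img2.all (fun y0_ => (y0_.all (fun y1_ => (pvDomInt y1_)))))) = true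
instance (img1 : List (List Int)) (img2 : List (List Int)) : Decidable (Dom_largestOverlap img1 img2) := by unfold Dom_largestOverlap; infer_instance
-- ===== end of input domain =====

-- B is a different algorithm (count displacement vectors between 1-cells in a dictionary, take the max count)
-- proved to return the same value as A's brute-force scan over all shifts; equivalence is about return values.

-- ===== PORT A =====
-- img[i][j] ; in-range under Pre_ (out of range Python raises, excluded by Pre_)
def pvA_at (img : List (List Int)) (i j : Int) : Int :=
  PySem.List.pyGetD (PySem.List.pyGetD img i []) j 0

-- the inner double loop of A computing current_overlap for one shift (dx, dy)
def pvA_shiftCount (img1 img2 : List (List Int)) (N dx dy : Int) : Int :=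
  (PySem.List.pyRange 0 N 1).foldl (fun cur x =>
    if 0 ≤ dx + x ∧ dx + x < N then
      (PySem.List.pyRange 0 N 1).foldl (fun cur y =>
        if 0 ≤ dy + y ∧ dy + y < N then
          cur + (if pvA_at img1 (x + dx) (y + dy) = pvA_at img2 x y ∧ pvA_at img2 x y = 1 then 1 else 0)
        else cur) cur
    else cur) 0

def largestOverlap (img1 : List (List Int)) (img2 : List (List Int)) : Int :=
  let N : Int := (img1.length : Int)
  (PySem.List.pyRange (-N + 1) N 1).foldl (fun best dx =>
    (PySem.List.pyRange (-N + 1) N 1).foldl (fun best dy =>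
      max best (pvA_shiftCount img1 img2 N dx dy)) best) 0

-- ===== PORT B =====
def pvB_at (img : List (List Int)) (i j : Int) : Int :=
  PySem.List.pyGetD (PySem.List.pyGetD img i []) j 0

-- [(x, y) for x in range(N) for y in range(N) if img[x][y] == 1]
def pvB_ones (img : List (List Int)) (N : Int) : List (Int × Int) :=
  (PySem.List.pyRange 0 N 1).flatMap (fun x =>
    ((PySem.List.pyRange 0 N 1).filter (fun y => pvB_at img x y == 1)).map (fun y => (x, y)))

-- the loop body: d = (x1-x2, y1-y2); c = counts.get(d,0)+1; counts[d] = c; best = c if c > best else best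
def pvB_step (st : PySem.Dict (Int × Int) Int × Int) (d : Int × Int) :
    PySem.Dict (Int × Int) Int × Int :=
  let c := st.1.getD d 0 + 1
  (st.1.insert d c, if c > st.2 then c else st.2)

def largestOverlap_alt (img1 : List (List Int)) (img2 : List (List Int)) : Int :=
  let N : Int := (img1.length : Int)
  let ones1 := pvB_ones img1 N
  let ones2 := pvB_ones img2 N
  let r := ones1.foldl (fun st p =>
    ones2.foldl (fun st q => pvB_step st (p.1 - q.1, p.2 - q.2)) st)
    (PySem.Dict.empty, 0)
  r.2

-- ===== PRECONDITION & SPEC =====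
-- Pre_ excludes exactly the inputs on which Python A raises IndexError: it reads the full
-- N x N top-left block of both images (N = len(img1)), so every row of img1 and the first N
-- rows of img2 must have length >= N, and img2 must have >= N rows.
def Pre_largestOverlap (img1 : List (List Int)) (img2 : List (List Int)) : Prop :=
  (∀ row ∈ img1, img1.length ≤ row.length) ∧ img1.length ≤ img2.length ∧
    ∀ row ∈ img2.take img1.length, img1.length ≤ row.length
instance (img1 : List (List Int)) (img2 : List (List Int)) : Decidable (Pre_largestOverlap img1 img2) := by
  unfold Pre_largestOverlap; infer_instance

def pvWitness_largestOverlap : List (List Int) × List (List Int) := ([[1, 0], [0, 1]], [[0, 1], [1, 0]])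

def Spec_largestOverlap (img1 : List (List Int)) (img2 : List (List Int)) (out : Int) : Prop := out = largestOverlap_alt img1 img2
instance (img1 : List (List Int)) (img2 : List (List Int)) (out : Int) : Decidable (Spec_largestOverlap img1 img2 out) := by unfold Spec_largestOverlap; infer_instance

-- ===== CLAIM (what is proved, stated in full; the proofs are below) =====
def Claim_equal_largestOverlap : Prop := ∀ (img1 : List (List Int)) (img2 : List (List Int)), Dom_largestOverlap img1 img2 → Pre_largestOverlap img1 img2 → Spec_largestOverlap img1 img2 (largestOverlap img1 img2)

-- ===== LEMMAS AND PROOFS =====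

-- pvB_at and pvA_at are the same accessor
theorem pvB_at_eq : pvB_at = pvA_at := rfl

-- the multiset of displacement vectors between 1-cells of the two images
def pvDs (l1 l2 : List (Int × Int)) : List (Int × Int) :=
  l1.flatMap (fun p => l2.map (fun q => (p.1 - q.1, p.2 - q.2)))

-- the common summand: an (a, b) pair of matched 1-cells for shift (dx, dy)
def pvF (img1 img2 : List (List Int)) (N dx dy a b : Int) : Int :=
  if 0 ≤ a ∧ a < N ∧ 0 ≤ a - dx ∧ a - dx < N ∧ 0 ≤ b ∧ b < N ∧ 0 ≤ b - dy ∧ b - dy < N ∧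
      pvA_at img1 a b = 1 ∧ pvA_at img2 (a - dx) (b - dy) = 1 then 1 else 0

-- running max over one list
theorem pv_foldlmax1 (g : Int → Int) (T : List Int) : ∀ b : Int,
    b ≤ T.foldl (fun b t => max b (g t)) b ∧
    (∀ t ∈ T, g t ≤ T.foldl (fun b t => max b (g t)) b) ∧
    (T.foldl (fun b t => max b (g t)) b = b ∨ ∃ t ∈ T, T.foldl (fun b t => max b (g t)) b = g t) := by
  induction T with
  | nil => intro b; simp
  | cons t ts ih =>
    intro b
    obtain ⟨h1, h2, h3⟩ := ih (max b (g t))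
    refine ⟨le_trans (le_max_left _ _) h1, ?_, ?_⟩
    · intro t' ht'
      rcases List.mem_cons.1 ht' with h | h
      · subst h; exact le_trans (le_max_right _ _) h1
      · exact h2 t' h
    · rcases h3 with h | ⟨t', ht', he⟩
      · rcases max_choice b (g t) with hm | hm
        · left; simpa [List.foldl_cons, hm] using h
        · right; exact ⟨t, List.mem_cons_self, by simpa [List.foldl_cons, hm] using h⟩
      · right; exact ⟨t', List.mem_cons_of_mem _ ht', he⟩

-- running max over two nested lists
theorem pv_foldlmax2 (g : Int → Int → Int) (S T : List Int) : ∀ b : Int,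
    b ≤ S.foldl (fun b s => T.foldl (fun b t => max b (g s t)) b) b ∧
    (∀ s ∈ S, ∀ t ∈ T, g s t ≤ S.foldl (fun b s => T.foldl (fun b t => max b (g s t)) b) b) ∧
    (S.foldl (fun b s => T.foldl (fun b t => max b (g s t)) b) b = b ∨
      ∃ s ∈ S, ∃ t ∈ T, S.foldl (fun b s => T.foldl (fun b t => max b (g s t)) b) b = g s t) := by
  induction S with
  | nil => intro b; simp
  | cons s0 ss ih =>
    intro b
    obtain ⟨g1, g2, g3⟩ := pv_foldlmax1 (g s0) T b
    obtain ⟨h1, h2, h3⟩ := ih (T.foldl (fun b t => max b (g s0 t)) b)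
    refine ⟨le_trans g1 h1, ?_, ?_⟩
    · intro s hs t ht
      rcases List.mem_cons.1 hs with h | h
      · subst h; exact le_trans (g2 t ht) h1
      · exact h2 s h t ht
    · rcases h3 with h | ⟨s, hs, t, ht, he⟩
      · rcases g3 with h' | ⟨t, ht, he⟩
        · left; simpa [List.foldl_cons, h'] using h
        · right; exact ⟨s0, List.mem_cons_self, t, ht, by simpa [List.foldl_cons, he] using h⟩
      · right; exact ⟨s, List.mem_cons_of_mem _ hs, t, ht, he⟩

-- B's nested loop is a fold of pvB_step over the displacement list
theorem pv_nested_foldl (l1 l2 : List (Int × Int)) :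
    ∀ init, l1.foldl (fun st p => l2.foldl (fun st q => pvB_step st (p.1 - q.1, p.2 - q.2)) st) init =
      (pvDs l1 l2).foldl pvB_step init := by
  induction l1 with
  | nil => intro init; simp [pvDs]
  | cons p l1 ih =>
    intro init
    simp only [List.foldl_cons, pvDs, List.flatMap_cons, List.foldl_append, ih, List.foldl_map]

-- the dict component of B's fold is the counting fold
theorem pv_dict_fold (l : List (Int × Int)) :
    ∀ st, (l.foldl pvB_step st).1 =
      l.foldl (fun d x => d.insert x (d.getD x 0 + 1)) st.1 := by
  induction l with
  | nil => intro st; rfl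
  | cons x l ih =>
    intro st
    simp only [List.foldl_cons, ih, pvB_step]

-- characterisation of B's running best: the max multiplicity in l
theorem pv_best_char (l : List (Int × Int)) :
    0 ≤ (l.foldl pvB_step (PySem.Dict.empty, 0)).2 ∧
    (∀ d ∈ l, (l.count d : Int) ≤ (l.foldl pvB_step (PySem.Dict.empty, 0)).2) ∧
    ((l.foldl pvB_step (PySem.Dict.empty, 0)).2 = 0 ∨
      ∃ d ∈ l, (l.foldl pvB_step (PySem.Dict.empty, 0)).2 = (l.count d : Int)) := by
  induction l using List.reverseRecOn with
  | nil => simp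
  | append_singleton l x ih =>
    obtain ⟨ih1, ih2, ih3⟩ := ih
    have hdict : ∀ d : Int × Int,
        (l.foldl pvB_step (PySem.Dict.empty, 0)).1.getD d 0 = (l.count d : Int) := by
      intro d
      rw [pv_dict_fold, PySem.Dict.getD_foldl_insert_add_one]
      simp
    rw [List.foldl_append]
    set st := l.foldl pvB_step (PySem.Dict.empty, 0) with hst
    have hc : st.1.getD x 0 + 1 = (l.count x : Int) + 1 := by rw [hdict]
    have hcount : ∀ d : Int × Int, ((l ++ [x]).count d : Int) =
        (l.count d : Int) + (if x = d then 1 else 0) := by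
      intro d
      rw [List.count_append, List.count_singleton]
      push_cast
      split_ifs with h1 h2 h2 <;> simp_all
    simp only [List.foldl_cons, List.foldl_nil, pvB_step, hc]
    refine ⟨?_, ?_, ?_⟩
    · split_ifs with h <;> omega
    · intro d hd
      rw [hcount d]
      by_cases hdx : x = d
      · subst hdx
        have : l.count x = List.count x l := rfl
        split_ifs with h <;> simp <;> omega
      · have hdl : d ∈ l := by
          rcases List.mem_append.1 hd with h | h
          · exact h
          · simp at h; exact absurd h.symm hdx
        have := ih2 d hdl
        split_ifs with h <;> simp <;> omega
    · split_ifs with h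
      · right
        exact ⟨x, by simp, by rw [hcount x]; simp⟩
      · rcases ih3 with h0 | ⟨d, hd, he⟩
        · left; exact h0
        · right
          by_cases hdx : x = d
          · subst hdx
            omega
          · exact ⟨d, by simp [List.mem_append.2 (Or.inl hd)], by rw [hcount d]; simp [hdx]; omega⟩

theorem pv_mem_ones (img : List (List Int)) (N : Int) (p : Int × Int) :
    p ∈ pvB_ones img N ↔ 0 ≤ p.1 ∧ p.1 < N ∧ 0 ≤ p.2 ∧ p.2 < N ∧ pvA_at img p.1 p.2 = 1 := by
  obtain ⟨a, b⟩ := p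
  simp [pvB_ones, List.mem_flatMap, List.mem_map, List.mem_filter,
    PySem.List.mem_pyRange_one, pvB_at_eq, beq_iff_eq]
  tauto

theorem pv_nodup_ones (img : List (List Int)) (N : Int) : (pvB_ones img N).Nodup := by
  unfold pvB_ones
  rw [List.nodup_flatMap]
  constructor
  · intro x _
    exact ((PySem.List.nodup_pyRange_one 0 N).filter _).map (fun a b h => by
      simpa using congrArg Prod.snd h)
  · refine List.Pairwise.imp ?_ (PySem.List.pairwise_lt_pyRange_one 0 N)
    intro a b hab z hz hz'
    simp only [List.mem_map, List.mem_filter] at hz hz'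
    obtain ⟨y, _, rfl⟩ := hz
    obtain ⟨y', _, h⟩ := hz'
    have := congrArg Prod.fst h
    simp at this
    omega

-- sum over the range list as a Finset sum
theorem pv_sum_pyRange (N : Int) (f : Int → Int) :
    ((PySem.List.pyRange 0 N 1).map f).sum = ∑ x ∈ Finset.Ico (0 : Int) N, f x := by
  have H : ∀ M : Int, 0 ≤ M → ((PySem.List.pyRange 0 M 1).map f).sum = ∑ x ∈ Finset.Ico (0 : Int) M, f x := by
    intro M hM
    induction M, hM using Int.le_induction with
    | base => simp [PySem.List.pyRange_one_eq_nil]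
    | succ M hM ih =>
      have hins : Finset.Ico (0 : Int) (M + 1) = insert M (Finset.Ico 0 M) := by
        ext x; simp [Finset.mem_Ico, Finset.mem_insert]; omega
      rw [PySem.List.pyRange_one_succ_right hM, List.map_append, List.sum_append, ih, hins,
        Finset.sum_insert (by simp)]
      simp [add_comm]
  by_cases h : 0 ≤ N
  · exact H N h
  · rw [PySem.List.pyRange_one_eq_nil (by omega), Finset.Ico_eq_empty (by omega)]
    simp

theorem pv_sum_filter_map (l : List Int) (p : Int → Bool) (g : Int → Int) :
    ((l.filter p).map g).sum = (l.map (fun y => if p y then g y else 0)).sum := by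
  induction l with
  | nil => rfl
  | cons x l ih =>
    by_cases h : p x <;> simp [h, ih]

theorem pv_sum_flatMap (l : List Int) (f : Int → List Int) :
    (l.flatMap f).sum = (l.map (fun x => (f x).sum)).sum := by
  induction l with
  | nil => rfl
  | cons x l ih => simp [List.flatMap_cons, ih]

-- reindexing a sum by a shift when the summand vanishes outside both windows
theorem pv_shift_sum (N d : Int) (G : Int → Int)
    (h : ∀ u, G u ≠ 0 → (0 ≤ u ∧ u < N ∧ 0 ≤ u - d ∧ u - d < N)) :
    ∑ x ∈ Finset.Ico (0 : Int) N, G (x + d) = ∑ u ∈ Finset.Ico (0 : Int) N, G u := by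
  have e0 : ∑ x ∈ Finset.Ico (0 : Int) N, G (x + d) = ∑ x ∈ Finset.Ico d (N + d), G x := by
    have hm : Finset.Ico d (N + d) = Finset.map (addRightEmbedding d) (Finset.Ico 0 N) := by
      rw [Finset.map_add_right_Ico]; rw [zero_add]
    rw [hm, Finset.sum_map]
    simp [addRightEmbedding]
  rw [e0]
  have e1 : ∑ x ∈ Finset.Ico d (N + d) ∩ Finset.Ico 0 N, G x = ∑ x ∈ Finset.Ico d (N + d), G x := by
    refine Finset.sum_subset Finset.inter_subset_left ?_
    intro x hx hx'
    by_contra hG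
    have := h x hG
    simp only [Finset.mem_inter, Finset.mem_Ico] at hx hx'
    omega
  have e2 : ∑ x ∈ Finset.Ico d (N + d) ∩ Finset.Ico 0 N, G x = ∑ x ∈ Finset.Ico (0 : Int) N, G x := by
    refine Finset.sum_subset Finset.inter_subset_right ?_
    intro x hx hx'
    by_contra hG
    have := h x hG
    simp only [Finset.mem_inter, Finset.mem_Ico] at hx hx'
    omega
  rw [← e1, e2]

-- A's per-shift overlap as a double Finset sum
theorem pv_A_sum (img1 img2 : List (List Int)) (N dx dy : Int) :
    pvA_shiftCount img1 img2 N dx dy =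
      ∑ x ∈ Finset.Ico (0 : Int) N, ∑ y ∈ Finset.Ico (0 : Int) N,
        pvF img1 img2 N dx dy (x + dx) (y + dy) := by
  have inner : ∀ (x cur : Int),
      (PySem.List.pyRange 0 N 1).foldl (fun cur y => if 0 ≤ dy + y ∧ dy + y < N then
          cur + (if pvA_at img1 (x + dx) (y + dy) = pvA_at img2 x y ∧ pvA_at img2 x y = 1 then (1 : Int) else 0)
        else cur) cur =
      cur + ((PySem.List.pyRange 0 N 1).map (fun y => if 0 ≤ dy + y ∧ dy + y < N then
          (if pvA_at img1 (x + dx) (y + dy) = pvA_at img2 x y ∧ pvA_at img2 x y = 1 then (1 : Int) else 0)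
        else 0)).sum := by
    intro x cur
    rw [show (fun cur y => if 0 ≤ dy + y ∧ dy + y < N then
          cur + (if pvA_at img1 (x + dx) (y + dy) = pvA_at img2 x y ∧ pvA_at img2 x y = 1 then (1 : Int) else 0)
        else cur) =
        (fun cur y => cur + (if 0 ≤ dy + y ∧ dy + y < N then
          (if pvA_at img1 (x + dx) (y + dy) = pvA_at img2 x y ∧ pvA_at img2 x y = 1 then (1 : Int) else 0)
        else 0)) by funext cur y; split_ifs <;> simp]
    exact PySem.List.foldl_add _ _ _
  unfold pvA_shiftCount
  rw [show (fun cur x => if 0 ≤ dx + x ∧ dx + x < N then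
        (PySem.List.pyRange 0 N 1).foldl (fun cur y => if 0 ≤ dy + y ∧ dy + y < N then
          cur + (if pvA_at img1 (x + dx) (y + dy) = pvA_at img2 x y ∧ pvA_at img2 x y = 1 then (1 : Int) else 0)
        else cur) cur
      else cur) =
      (fun cur x => cur + (if 0 ≤ dx + x ∧ dx + x < N then
        ((PySem.List.pyRange 0 N 1).map (fun y => if 0 ≤ dy + y ∧ dy + y < N then
          (if pvA_at img1 (x + dx) (y + dy) = pvA_at img2 x y ∧ pvA_at img2 x y = 1 then (1 : Int) else 0)
        else 0)).sum
      else 0)) by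
    funext cur x
    split_ifs with h
    · exact inner x cur
    · simp]
  rw [PySem.List.foldl_add, zero_add, pv_sum_pyRange]
  refine Finset.sum_congr rfl ?_
  intro x hx
  by_cases hg : 0 ≤ dx + x ∧ dx + x < N
  · rw [if_pos hg, pv_sum_pyRange]
    refine Finset.sum_congr rfl ?_
    intro y hy
    simp only [Finset.mem_Ico] at hx hy
    unfold pvF
    simp only [add_sub_cancel_right]
    generalize pvA_at img1 (x + dx) (y + dy) = u
    generalize pvA_at img2 x y = v
    split_ifs <;> omega
  · rw [if_neg hg]
    symm
    refine Finset.sum_eq_zero ?_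
    intro y _
    unfold pvF
    rw [if_neg]
    rintro ⟨h1, h2, -⟩
    exact hg ⟨by omega, by omega⟩

theorem pv_count_ds (l1 l2 : List (Int × Int)) (h2 : l2.Nodup) (d : Int × Int) :
    (((pvDs l1 l2).count d : Int)) =
      (l1.map (fun p => if (p.1 - d.1, p.2 - d.2) ∈ l2 then (1 : Int) else 0)).sum := by
  induction l1 with
  | nil => simp [pvDs]
  | cons p l1 ih =>
    have hhead : (l2.map (fun q => (p.1 - q.1, p.2 - q.2))).count d =
        l2.count (p.1 - d.1, p.2 - d.2) := by
      show List.countP (· == d) _ = List.countP (· == (p.1 - d.1, p.2 - d.2)) l2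
      rw [List.countP_map]
      refine List.countP_congr ?_
      intro q _
      simp only [Function.comp, beq_iff_eq, Prod.ext_iff]
      constructor <;> (intro hh; obtain ⟨h1, h2⟩ := hh; constructor <;> omega)
    have hite : (l2.count (p.1 - d.1, p.2 - d.2) : Int) =
        if (p.1 - d.1, p.2 - d.2) ∈ l2 then (1 : Int) else 0 := by
      by_cases hm : (p.1 - d.1, p.2 - d.2) ∈ l2
      · rw [List.count_eq_one_of_mem h2 hm, if_pos hm]; rfl
      · rw [List.count_eq_zero_of_not_mem hm, if_neg hm]; rfl
    simp only [pvDs, List.flatMap_cons, List.count_append, List.map_cons, List.sum_cons]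
    push_cast
    rw [hhead, hite, ← ih]
    simp [pvDs]

-- the displacement count as the same double Finset sum
theorem pv_count_sum (img1 img2 : List (List Int)) (N dx dy : Int) :
    (((pvDs (pvB_ones img1 N) (pvB_ones img2 N)).count (dx, dy) : Int)) =
      ∑ a ∈ Finset.Ico (0 : Int) N, ∑ b ∈ Finset.Ico (0 : Int) N,
        pvF img1 img2 N dx dy a b := by
  rw [pv_count_ds _ _ (pv_nodup_ones img2 N)]
  set L2 := pvB_ones img2 N with hL2
  simp only [pvB_ones, List.map_flatMap, List.map_map, Function.comp_def]
  rw [pv_sum_flatMap]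
  simp only [pv_sum_filter_map]
  rw [pv_sum_pyRange]
  refine Finset.sum_congr rfl ?_
  intro x hx
  rw [pv_sum_pyRange]
  refine Finset.sum_congr rfl ?_
  intro y hy
  simp only [Finset.mem_Ico] at hx hy
  have hmem : ((x - dx, y - dy) ∈ L2) ↔
      (0 ≤ x - dx ∧ x - dx < N ∧ 0 ≤ y - dy ∧ y - dy < N ∧ pvA_at img2 (x - dx) (y - dy) = 1) := by
    rw [hL2, pv_mem_ones]
  unfold pvF
  simp only [pvB_at_eq, beq_iff_eq]
  by_cases hm : (x - dx, y - dy) ∈ L2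
  · obtain ⟨c1, c2, c3, c4, c5⟩ := hmem.1 hm
    rw [if_pos hm]
    by_cases hu : pvA_at img1 x y = 1
    · rw [if_pos hu, if_pos ⟨hx.1, hx.2, c1, c2, hy.1, hy.2, c3, c4, hu, c5⟩]
    · rw [if_neg hu, if_neg (fun h => hu h.2.2.2.2.2.2.2.2.1)]
  · have hc : ¬(0 ≤ x - dx ∧ x - dx < N ∧ 0 ≤ y - dy ∧ y - dy < N ∧ pvA_at img2 (x - dx) (y - dy) = 1) :=
      fun h => hm (hmem.2 h)
    rw [if_neg hm]
    conv_rhs => rw [if_neg (fun h : _ ∧ _ => hc ⟨h.2.2.1, h.2.2.2.1, h.2.2.2.2.2.2.1,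
      h.2.2.2.2.2.2.2.1, h.2.2.2.2.2.2.2.2.2⟩)]
    split_ifs <;> rfl

-- the bridge: A's per-shift count IS the displacement count
theorem pv_C_eq (img1 img2 : List (List Int)) (N dx dy : Int) :
    pvA_shiftCount img1 img2 N dx dy =
      (((pvDs (pvB_ones img1 N) (pvB_ones img2 N)).count (dx, dy) : Int)) := by
  rw [pv_A_sum, pv_count_sum]
  have hvan : ∀ a b, pvF img1 img2 N dx dy a b ≠ 0 →
      (0 ≤ a ∧ a < N ∧ 0 ≤ a - dx ∧ a - dx < N ∧ 0 ≤ b ∧ b < N ∧ 0 ≤ b - dy ∧ b - dy < N) := by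
    intro a b hnz
    unfold pvF at hnz
    by_cases hcond : 0 ≤ a ∧ a < N ∧ 0 ≤ a - dx ∧ a - dx < N ∧ 0 ≤ b ∧ b < N ∧ 0 ≤ b - dy ∧ b - dy < N ∧
        pvA_at img1 a b = 1 ∧ pvA_at img2 (a - dx) (b - dy) = 1
    · tauto
    · rw [if_neg hcond] at hnz
      exact absurd rfl hnz
  have hinner : ∀ x : Int, ∑ y ∈ Finset.Ico (0 : Int) N, pvF img1 img2 N dx dy (x + dx) (y + dy) =
      ∑ b ∈ Finset.Ico (0 : Int) N, pvF img1 img2 N dx dy (x + dx) b := by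
    intro x
    refine pv_shift_sum N dy (fun b => pvF img1 img2 N dx dy (x + dx) b) ?_
    intro u hu
    have := hvan (x + dx) u hu
    tauto
  calc ∑ x ∈ Finset.Ico (0 : Int) N, ∑ y ∈ Finset.Ico (0 : Int) N,
        pvF img1 img2 N dx dy (x + dx) (y + dy)
      = ∑ x ∈ Finset.Ico (0 : Int) N, ∑ b ∈ Finset.Ico (0 : Int) N,
        pvF img1 img2 N dx dy (x + dx) b := Finset.sum_congr rfl (fun x _ => hinner x)
    _ = ∑ a ∈ Finset.Ico (0 : Int) N, ∑ b ∈ Finset.Ico (0 : Int) N,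
        pvF img1 img2 N dx dy a b := by
        refine pv_shift_sum N dx (fun a => ∑ b ∈ Finset.Ico (0 : Int) N, pvF img1 img2 N dx dy a b) ?_
        intro u hu
        by_contra hc
        apply hu
        refine Finset.sum_eq_zero ?_
        intro b _
        by_contra hb
        have := hvan u b hb
        exact hc ⟨this.1, this.2.1, this.2.2.1, this.2.2.2.1⟩

theorem pv_mem_ds_range (img1 img2 : List (List Int)) (N : Int) (d : Int × Int)
    (h : d ∈ pvDs (pvB_ones img1 N) (pvB_ones img2 N)) :
    -N + 1 ≤ d.1 ∧ d.1 < N ∧ -N + 1 ≤ d.2 ∧ d.2 < N := by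
  simp only [pvDs, List.mem_flatMap, List.mem_map] at h
  obtain ⟨p, hp, q, hq, rfl⟩ := h
  rw [pv_mem_ones] at hp hq
  simp only
  omega

-- ===== VERDICT (by name: the statement is the Claim_ definition above) =====
theorem largestOverlap_spec : Claim_equal_largestOverlap := by
  intro img1 img2 _ _
  unfold Spec_largestOverlap largestOverlap largestOverlap_alt
  dsimp only
  rw [pv_nested_foldl]
  obtain ⟨hA0, hA2, hA3⟩ := pv_foldlmax2
    (fun dx dy => pvA_shiftCount img1 img2 (img1.length : Int) dx dy)
    (PySem.List.pyRange (-(img1.length : Int) + 1) (img1.length : Int) 1)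
    (PySem.List.pyRange (-(img1.length : Int) + 1) (img1.length : Int) 1) 0
  obtain ⟨hB0, hB2, hB3⟩ := pv_best_char
    (pvDs (pvB_ones img1 (img1.length : Int)) (pvB_ones img2 (img1.length : Int)))
  apply le_antisymm
  · rcases hA3 with h0 | ⟨dx, hdx, dy, hdy, he⟩
    · rw [h0]; exact hB0
    · rw [he, pv_C_eq]
      by_cases hm : ((dx, dy) : Int × Int) ∈
          pvDs (pvB_ones img1 (img1.length : Int)) (pvB_ones img2 (img1.length : Int))
      · exact hB2 _ hm
      · rw [List.count_eq_zero_of_not_mem hm]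
        exact hB0
  · rcases hB3 with h0 | ⟨d, hd, he⟩
    · rw [h0]; exact hA0
    · obtain ⟨r1, r2, r3, r4⟩ := pv_mem_ds_range img1 img2 (img1.length : Int) d hd
      have := hA2 d.1 (by rw [PySem.List.mem_pyRange_one]; omega)
        d.2 (by rw [PySem.List.mem_pyRange_one]; omega)
      rw [he]
      rw [pv_C_eq] at this
      simpa using this
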